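-- pv_equiv track=rewrite | github.com/motaz-990/tricks | jack_training.py | play_order
-- ===== SOURCE A (Python) =====
-- def play_order(players,order_of_play ,first_player):
--     #if first_game:
--      #   first_player = first_kingdom(players)
--
--     ordered_players = []
--     ordered_names = []
--
--     for i in range(len(players)):
--         ordered_players += [players[first_player % len(players)]]
--         ordered_names += [order_of_play[first_player % len(players)]]
--         first_player += 1
--
--     return ordered_players,ordered_names
-- ===== SOURCE B (Python) =====
-- def play_order(players, order_of_play, first_player):
--     n = len(players)
--     if n == 0:
--         return [], []
--     s = first_player % n
--     ordered_players = players[s:] + players[:s]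
--     ordered_names = [order_of_play[i] for i in range(s, n)] + [order_of_play[i] for i in range(s)]
--     return ordered_players, ordered_names
-- ===== Notes on version B (the rewrite author's own statement) =====
-- stated objective: simpler
-- what changed: Replaces the per-element modulo-index loop with a single slice-concatenation rotation of players plus two direct-index comprehensions for the names.
import Mathlib
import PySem

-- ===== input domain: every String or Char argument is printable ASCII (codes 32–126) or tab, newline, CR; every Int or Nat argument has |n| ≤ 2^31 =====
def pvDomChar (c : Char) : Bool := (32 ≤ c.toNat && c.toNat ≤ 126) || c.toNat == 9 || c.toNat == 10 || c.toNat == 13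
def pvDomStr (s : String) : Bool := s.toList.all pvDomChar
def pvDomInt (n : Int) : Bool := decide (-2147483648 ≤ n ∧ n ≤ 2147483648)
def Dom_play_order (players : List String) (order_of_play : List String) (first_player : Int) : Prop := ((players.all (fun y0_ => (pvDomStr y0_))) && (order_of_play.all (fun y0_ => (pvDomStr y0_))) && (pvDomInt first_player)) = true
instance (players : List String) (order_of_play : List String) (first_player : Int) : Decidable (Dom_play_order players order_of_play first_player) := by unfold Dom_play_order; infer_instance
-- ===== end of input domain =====

-- B replaces A's per-element modulo-index loop by one slice-concatenation rotation plus direct-index comprehensions (simpler); return value only, no mutation.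

-- ===== PORT A =====
-- A's loop: for i in range(len(players)), append players[fp % n] and order_of_play[fp % n], fp += 1.
def play_order (players : List String) (order_of_play : List String) (first_player : Int) : List String × List String :=
  let n : Int := players.length
  let st := (PySem.List.pyRange 0 n 1).foldl
    (fun (st : List String × List String × Int) _i =>
      (st.1 ++ [PySem.List.pyGetD players (PySem.Int.mod st.2.2 n) ""],
       st.2.1 ++ [PySem.List.pyGetD order_of_play (PySem.Int.mod st.2.2 n) ""],
       st.2.2 + 1)) ([], [], first_player)
  (st.1, st.2.1)

-- ===== PORT B =====
def play_order_alt (players : List String) (order_of_play : List String) (first_player : Int) : List String × List String :=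
  let n : Int := players.length
  if n = 0 then ([], [])
  else
    let s := PySem.Int.mod first_player n
    (PySem.List.slice players (some s) none ++ PySem.List.slice players none (some s),
     (PySem.List.pyRange s n 1).map (fun i => PySem.List.pyGetD order_of_play i "")
       ++ (PySem.List.pyRange 0 s 1).map (fun i => PySem.List.pyGetD order_of_play i ""))

-- ===== PRECONDITION & SPEC =====
-- Pre_ excludes exactly the inputs where A raises IndexError: a non-empty players with order_of_play shorter than players (B raises there too).
def Pre_play_order (players : List String) (order_of_play : List String) (first_player : Int) : Prop :=
  players = [] ∨ players.length ≤ order_of_play.length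
instance (players : List String) (order_of_play : List String) (first_player : Int) : Decidable (Pre_play_order players order_of_play first_player) := by unfold Pre_play_order; infer_instance
def pvWitness_play_order : List String × List String × Int := (["a", "b", "c"], ["x", "y", "z"], 4)

def Spec_play_order (players : List String) (order_of_play : List String) (first_player : Int) (out : List String × List String) : Prop := out = play_order_alt players order_of_play first_player
instance (players : List String) (order_of_play : List String) (first_player : Int) (out : List String × List String) : Decidable (Spec_play_order players order_of_play first_player out) := by unfold Spec_play_order; infer_instance

-- ===== CLAIM (what is proved, stated in full; the proofs are below) =====
def Claim_equal_play_order : Prop := ∀ (players : List String) (order_of_play : List String) (first_player : Int), Dom_play_order players order_of_play first_player → Pre_play_order players order_of_play first_player → Spec_play_order players order_of_play first_player (play_order players order_of_play first_player)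

-- ===== LEMMAS AND PROOFS =====

-- A's loop after k iterations: the two accumulators hold the values at indices (fp+j) % n, j < k.
lemma play_order_fold (players order_of_play : List String) (k : Nat) (fp : Int) :
    (PySem.List.pyRange 0 (k : Int) 1).foldl
      (fun (st : List String × List String × Int) _i =>
        (st.1 ++ [PySem.List.pyGetD players (PySem.Int.mod st.2.2 (players.length : Int)) ""],
         st.2.1 ++ [PySem.List.pyGetD order_of_play (PySem.Int.mod st.2.2 (players.length : Int)) ""],
         st.2.2 + 1)) ([], [], fp)
    = ((List.range k).map (fun j : Nat => PySem.List.pyGetD players (PySem.Int.mod (fp + (j : Int)) (players.length : Int)) ""),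
       (List.range k).map (fun j : Nat => PySem.List.pyGetD order_of_play (PySem.Int.mod (fp + (j : Int)) (players.length : Int)) ""),
       fp + k) := by
  induction k with
  | zero => simp [PySem.List.pyRange_one_eq_nil]
  | succ k ih =>
      rw [show ((k + 1 : Nat) : Int) = (k : Int) + 1 by push_cast; ring,
          PySem.List.pyRange_one_succ_right (by positivity), List.foldl_append, ih]
      simp only [List.foldl_cons, List.foldl_nil, List.range_succ, List.map_append, List.map_cons, List.map_nil]
      refine Prod.ext ?_ (Prod.ext ?_ ?_) <;> simp <;> first
        | (push_cast; ring)
        | rfl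
-- index arithmetic: (fp + j) mod N = (s + j) % N with s = (fp mod N).toNat
lemma mod_index_eq (fp : Int) (N : Nat) (j : Nat) (hN : 0 < N) :
    PySem.Int.mod (fp + (j : Int)) (N : Int) = (((PySem.Int.mod fp (N : Int)).toNat + j) % N : Nat) := by
  have hpos : (0 : Int) < (N : Int) := by exact_mod_cast hN
  rw [PySem.Int.mod_eq_emod_of_pos hpos, PySem.Int.mod_eq_emod_of_pos hpos]
  have h0 : 0 ≤ fp % (N : Int) := Int.emod_nonneg _ (by omega)
  have hrepr : fp % (N : Int) = ((fp % (N : Int)).toNat : Int) := by omega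
  have h1 : ((((fp % (N : Int)).toNat + j) % N : Nat) : Int) = (fp % (N : Int) + (j : Int)) % (N : Int) := by
    push_cast
    rw [← hrepr]
  rw [h1, Int.emod_add_emod]

-- A's rotated prefix as a map over range
lemma map_mod_eq_rotate (xs : List String) (N : Nat) (hN : 0 < N) (hlen : N ≤ xs.length) (fp : Int) :
    (List.range N).map (fun j : Nat => PySem.List.pyGetD xs (PySem.Int.mod (fp + (j : Int)) (N : Int)) "")
    = (xs.take N).rotate (PySem.Int.mod fp (N : Int)).toNat := by
  have hlen' : (xs.take N).length = N := by simp [hlen]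
  apply List.ext_getElem
  · simp [hlen', List.length_rotate]
  · intro i h1 h2
    simp only [List.getElem_map, List.getElem_range]
    rw [mod_index_eq fp N i hN]
    have hlt : (((PySem.Int.mod fp (N : Int)).toNat + i) % N) < N := Nat.mod_lt _ hN
    rw [PySem.List.pyGetD_natCast, List.getD_eq_getElem _ _ (by omega),
        List.getElem_rotate]
    simp only [hlen', List.getElem_take]
    congr 1
    rw [Nat.add_comm]

-- B's comprehension over range(a, N) picks the contiguous segment drop a of take N.
lemma map_getD_pyRange_seg (xs : List String) (a N : Nat) (hN : N ≤ xs.length) :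
    (PySem.List.pyRange (a : Int) (N : Int) 1).map (fun i => PySem.List.pyGetD xs i "")
    = (xs.take N).drop a := by
  apply List.ext_getElem
  · simp only [List.length_map, PySem.List.length_pyRange_one, List.length_drop, List.length_take]
    omega
  · intro i h1 h2
    simp only [List.getElem_map]
    rw [PySem.List.getElem_pyRange_one]
    have hi : a + i < N := by
      simp [PySem.List.length_pyRange_one] at h1
      omega
    rw [show (a : Int) + (i : Int) = ((a + i : Nat) : Int) by push_cast; ring,
        PySem.List.pyGetD_natCast, List.getD_eq_getElem _ _ (by omega)]
    simp [List.getElem_drop, List.getElem_take]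

theorem play_order_spec : Claim_equal_play_order := by
  intro players order_of_play first_player _hdom hpre
  unfold Spec_play_order play_order play_order_alt
  rcases Nat.eq_zero_or_pos players.length with h0 | hN
  · simp [List.length_eq_zero_iff.mp h0, PySem.List.pyRange_one_eq_nil]
  · have hne : (players.length : Int) ≠ 0 := by exact_mod_cast (by omega : players.length ≠ 0)
    have hord : players.length ≤ order_of_play.length := by
      rcases hpre with h | h
      · simp [h] at hN
      · exact h
    have hpos : (0 : Int) < (players.length : Int) := by exact_mod_cast hN
    have hs0 : 0 ≤ PySem.Int.mod first_player (players.length : Int) :=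
      PySem.Int.mod_nonneg first_player hpos
    have hsN : PySem.Int.mod first_player (players.length : Int) < (players.length : Int) :=
      PySem.Int.mod_lt first_player hpos
    have hcast : PySem.Int.mod first_player (players.length : Int)
        = (((PySem.Int.mod first_player (players.length : Int)).toNat : Nat) : Int) := by omega
    have hsle : (PySem.Int.mod first_player (players.length : Int)).toNat ≤ players.length := by omega
    simp only [play_order_fold players order_of_play players.length first_player, if_neg hne]
    rw [map_mod_eq_rotate players players.length hN le_rfl first_player,
        map_mod_eq_rotate order_of_play players.length hN hord first_player,
        PySem.List.slice_from players hs0, PySem.List.slice_to players hs0,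
        hcast,
        map_getD_pyRange_seg order_of_play _ players.length hord,
        show ((0 : Int)) = ((0 : Nat) : Int) by rfl,
        map_getD_pyRange_seg order_of_play 0 _ (le_trans hsle hord)]
    refine Prod.ext ?_ ?_
    · simp only []
      rw [List.rotate_eq_drop_append_take (by simp; omega)]
      simp
    · simp only []
      rw [List.rotate_eq_drop_append_take (by simp; omega)]
      simp only [Int.toNat_natCast, List.drop_zero, List.take_take, Nat.min_eq_left hsle]
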